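-- pv_equiv track=rewrite | github.com/chengandre/finMapReduce | mapreduce_pipeline.py | _calculate_phase_token_totals
-- ===== SOURCE A (Python) =====
-- from typing import Dict, List, Any, Tuple, Optional, Union
--
-- def _calculate_phase_token_totals(qa_data: List[Dict[str, Any]]) -> Dict[str, Dict[str, int]]:
--     """Calculate dataset-level token totals for map and reduce phases separately."""
--     map_totals = {"input_tokens": 0, "output_tokens": 0, "cache_read_tokens": 0}
--     reduce_totals = {"input_tokens": 0, "output_tokens": 0, "cache_read_tokens": 0}
--
--     for qa_pair in qa_data:
--         token_stats = qa_pair.get('token_stats', {})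
--
--         # Aggregate map phase tokens
--         map_phase = token_stats.get('map_phase', {})
--         map_totals["input_tokens"] += map_phase.get("input_tokens", 0)
--         map_totals["output_tokens"] += map_phase.get("output_tokens", 0)
--         map_totals["cache_read_tokens"] += map_phase.get("cache_read_tokens", 0)
--
--         # Aggregate reduce phase tokens
--         reduce_phase = token_stats.get('reduce_phase', {})
--         reduce_totals["input_tokens"] += reduce_phase.get("input_tokens", 0)
--         reduce_totals["output_tokens"] += reduce_phase.get("output_tokens", 0)
--         reduce_totals["cache_read_tokens"] += reduce_phase.get("cache_read_tokens", 0)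
--
--     return {
--         "map_phase_total": map_totals,
--         "reduce_phase_total": reduce_totals
--     }
-- ===== SOURCE B (Python) =====
-- def _calculate_phase_token_totals(qa_data):
--     """Calculate dataset-level token totals for map and reduce phases separately."""
--     token_keys = ("input_tokens", "output_tokens", "cache_read_tokens")
--     return {
--         out_key: {
--             tk: sum(qa_pair.get('token_stats', {}).get(phase, {}).get(tk, 0)
--                     for qa_pair in qa_data)
--             for tk in token_keys
--         }
--         for out_key, phase in (("map_phase_total", "map_phase"),
--                                ("reduce_phase_total", "reduce_phase"))
--     }
-- ===== Notes on version B (the rewrite author's own statement) =====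
-- stated objective: simpler
-- what changed: Replaces the single simultaneous pass mutating two accumulator dicts with nested comprehensions over (output key, phase) and token keys, computing each of the six totals as an independent sum over qa_data.
import Mathlib
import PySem

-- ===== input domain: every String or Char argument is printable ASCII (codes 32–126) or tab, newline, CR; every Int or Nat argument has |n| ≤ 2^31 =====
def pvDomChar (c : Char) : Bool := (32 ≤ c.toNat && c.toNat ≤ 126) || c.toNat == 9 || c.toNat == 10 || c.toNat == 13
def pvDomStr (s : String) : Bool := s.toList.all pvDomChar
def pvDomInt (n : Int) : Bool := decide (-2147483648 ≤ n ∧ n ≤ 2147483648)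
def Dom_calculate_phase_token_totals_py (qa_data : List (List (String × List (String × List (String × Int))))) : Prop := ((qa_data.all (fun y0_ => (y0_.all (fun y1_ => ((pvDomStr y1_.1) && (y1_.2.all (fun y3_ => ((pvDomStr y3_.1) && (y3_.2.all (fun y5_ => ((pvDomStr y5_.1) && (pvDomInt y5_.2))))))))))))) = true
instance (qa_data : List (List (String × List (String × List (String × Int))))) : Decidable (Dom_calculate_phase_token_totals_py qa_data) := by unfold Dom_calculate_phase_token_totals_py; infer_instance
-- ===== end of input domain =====

-- B replaces A's single pass mutating two accumulator dicts with six independent sums,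
-- one per (phase, token key) pair, assembled by nested maps (objective: simpler).


-- shared lookup helper: Python's dict (assoc list) .get(k, d) — first match
def pvDGet {α : Type} (l : List (String × α)) (k : String) (d : α) : α :=
  (PySem.Dict.mk l).getD k d

-- ===== PORT A =====
-- the body of A's for-loop (one qa_pair folded into the two accumulator dicts)
def pvStepA (st : PySem.Dict String Int × PySem.Dict String Int)
    (qa_pair : List (String × List (String × List (String × Int)))) :
    PySem.Dict String Int × PySem.Dict String Int :=
  let token_stats := pvDGet qa_pair "token_stats" []
  let map_phase := pvDGet token_stats "map_phase" []
  let m1 := st.1.insert "input_tokens" (st.1.getD "input_tokens" 0 + pvDGet map_phase "input_tokens" 0)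
  let m2 := m1.insert "output_tokens" (m1.getD "output_tokens" 0 + pvDGet map_phase "output_tokens" 0)
  let m3 := m2.insert "cache_read_tokens" (m2.getD "cache_read_tokens" 0 + pvDGet map_phase "cache_read_tokens" 0)
  let reduce_phase := pvDGet token_stats "reduce_phase" []
  let r1 := st.2.insert "input_tokens" (st.2.getD "input_tokens" 0 + pvDGet reduce_phase "input_tokens" 0)
  let r2 := r1.insert "output_tokens" (r1.getD "output_tokens" 0 + pvDGet reduce_phase "output_tokens" 0)
  let r3 := r2.insert "cache_read_tokens" (r2.getD "cache_read_tokens" 0 + pvDGet reduce_phase "cache_read_tokens" 0)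
  (m3, r3)

def calculate_phase_token_totals_py (qa_data : List (List (String × List (String × List (String × Int))))) : List (String × List (String × Int)) :=
  let map_totals : PySem.Dict String Int :=
    PySem.Dict.mk [("input_tokens", 0), ("output_tokens", 0), ("cache_read_tokens", 0)]
  let reduce_totals : PySem.Dict String Int :=
    PySem.Dict.mk [("input_tokens", 0), ("output_tokens", 0), ("cache_read_tokens", 0)]
  let res := qa_data.foldl pvStepA (map_totals, reduce_totals)
  [("map_phase_total", res.1.items), ("reduce_phase_total", res.2.items)]

-- ===== PORT B =====
def calculate_phase_token_totals_py_alt (qa_data : List (List (String × List (String × List (String × Int))))) : List (String × List (String × Int)) :=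
  [("map_phase_total", "map_phase"), ("reduce_phase_total", "reduce_phase")].map
    (fun op =>
      (op.1, ["input_tokens", "output_tokens", "cache_read_tokens"].map
        (fun tk =>
          (tk, (qa_data.map
            (fun qa_pair => pvDGet (pvDGet (pvDGet qa_pair "token_stats" []) op.2 []) tk 0)).sum))))

-- ===== PRECONDITION & SPEC =====
def Spec_calculate_phase_token_totals_py (qa_data : List (List (String × List (String × List (String × Int))))) (out : List (String × List (String × Int))) : Prop := out = calculate_phase_token_totals_py_alt qa_data
instance (qa_data : List (List (String × List (String × List (String × Int))))) (out : List (String × List (String × Int))) : Decidable (Spec_calculate_phase_token_totals_py qa_data out) := by unfold Spec_calculate_phase_token_totals_py; infer_instance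

-- ===== CLAIM (what is proved, stated in full; the proofs are below) =====
def Claim_equal_calculate_phase_token_totals_py : Prop := ∀ (qa_data : List (List (String × List (String × List (String × Int))))), Dom_calculate_phase_token_totals_py qa_data → Spec_calculate_phase_token_totals_py qa_data (calculate_phase_token_totals_py qa_data)

-- ===== LEMMAS AND PROOFS =====

-- the per-pair contribution both programs extract
def pvContrib (qa_pair : List (String × List (String × List (String × Int)))) (phase tk : String) : Int :=
  pvDGet (pvDGet (pvDGet qa_pair "token_stats" []) phase []) tk 0

-- one loop iteration on accumulators with the three literal keys adds the pair's contributions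
lemma pv_step_eq (qa : List (String × List (String × List (String × Int)))) (a b c d e f : Int) :
    pvStepA (PySem.Dict.mk [("input_tokens", a), ("output_tokens", b), ("cache_read_tokens", c)],
             PySem.Dict.mk [("input_tokens", d), ("output_tokens", e), ("cache_read_tokens", f)]) qa
    = (PySem.Dict.mk [("input_tokens", a + pvContrib qa "map_phase" "input_tokens"),
                      ("output_tokens", b + pvContrib qa "map_phase" "output_tokens"),
                      ("cache_read_tokens", c + pvContrib qa "map_phase" "cache_read_tokens")],
       PySem.Dict.mk [("input_tokens", d + pvContrib qa "reduce_phase" "input_tokens"),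
                      ("output_tokens", e + pvContrib qa "reduce_phase" "output_tokens"),
                      ("cache_read_tokens", f + pvContrib qa "reduce_phase" "cache_read_tokens")]) := by
  simp [pvStepA, pvContrib, PySem.Dict.insert,
        PySem.Dict.getD, PySem.Dict.get?, PySem.Dict.contains]

-- A's fold ends with the start values plus the six sums
lemma pv_foldA (l : List (List (String × List (String × List (String × Int)))))
    (a b c d e f : Int) :
    l.foldl pvStepA
      (PySem.Dict.mk [("input_tokens", a), ("output_tokens", b), ("cache_read_tokens", c)],
       PySem.Dict.mk [("input_tokens", d), ("output_tokens", e), ("cache_read_tokens", f)])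
    = (PySem.Dict.mk [("input_tokens", a + (l.map (fun qa => pvContrib qa "map_phase" "input_tokens")).sum),
                      ("output_tokens", b + (l.map (fun qa => pvContrib qa "map_phase" "output_tokens")).sum),
                      ("cache_read_tokens", c + (l.map (fun qa => pvContrib qa "map_phase" "cache_read_tokens")).sum)],
       PySem.Dict.mk [("input_tokens", d + (l.map (fun qa => pvContrib qa "reduce_phase" "input_tokens")).sum),
                      ("output_tokens", e + (l.map (fun qa => pvContrib qa "reduce_phase" "output_tokens")).sum),
                      ("cache_read_tokens", f + (l.map (fun qa => pvContrib qa "reduce_phase" "cache_read_tokens")).sum)]) := by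
  induction l generalizing a b c d e f with
  | nil => simp
  | cons qa t ih =>
    rw [List.foldl_cons, pv_step_eq, ih]
    simp [add_assoc]

-- ===== VERDICT (by name: the statement is the Claim_ definition above) =====
theorem calculate_phase_token_totals_py_spec : Claim_equal_calculate_phase_token_totals_py := by
  intro qa_data _
  show
    (let res := qa_data.foldl pvStepA
        (PySem.Dict.mk [("input_tokens", 0), ("output_tokens", 0), ("cache_read_tokens", 0)],
         PySem.Dict.mk [("input_tokens", 0), ("output_tokens", 0), ("cache_read_tokens", 0)]);
      [("map_phase_total", res.1.items), ("reduce_phase_total", res.2.items)])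
    = calculate_phase_token_totals_py_alt qa_data
  rw [pv_foldA]
  simp [calculate_phase_token_totals_py_alt, pvContrib]
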